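-- pv_equiv track=rewrite | github.com/wakadorimk2/personal-mcp-core | src/personal_mcp/tools/candidates.py | _frequent_texts
-- ===== SOURCE A (Python) =====
-- from collections import Counter
-- from typing import Any, Dict, List, Optional
--
-- def _normalize_text(text: str) -> str:
--     return text.strip().lower()
--
-- def _event_text(row: Dict[str, Any]) -> str:
--     text = row.get("data", {}).get("text", "")
--     return text.strip() if isinstance(text, str) else ""
--
-- def _frequent_texts(rows: List[Dict[str, Any]]) -> List[str]:
--     if not rows:
--         return []
--
--     counter: Counter[str] = Counter()
--     latest_idx: Dict[str, int] = {}
--     latest_text: Dict[str, str] = {}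
--
--     for idx, row in enumerate(rows):
--         text = _event_text(row)
--         normalized = _normalize_text(text)
--         if not normalized:
--             continue
--         counter[normalized] += 1
--         latest_idx[normalized] = idx
--         latest_text[normalized] = text
--
--     ordered_keys = sorted(counter.keys(), key=lambda k: (-counter[k], -latest_idx[k], k))
--     return [latest_text[k] for k in ordered_keys]
-- ===== SOURCE B (Python) =====
-- def _normalize_text(text: str) -> str:
--     return text.strip().lower()
--
-- def _event_text(row) -> str:
--     text = row.get("data", {}).get("text", "")
--     return text.strip() if isinstance(text, str) else ""
--
-- def _frequent_texts(rows):
--     # Pigeonhole (bucket) ranking, no comparison sort: one reverse pass builds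
--     # counts and the keys in recency (latest-first) order with their
--     # representative texts; each key is then dropped into the bucket of its
--     # count and the buckets are emitted from the highest count down, which
--     # preserves the recency order inside each count class.
--     counts = {}
--     order = []
--     rep = {}
--     for row in reversed(rows):
--         text = _event_text(row)
--         key = _normalize_text(text)
--         if not key:
--             continue
--         if key in counts:
--             counts[key] += 1
--         else:
--             counts[key] = 1
--             order.append(key)
--             rep[key] = text
--     buckets = [[] for _ in range(max(counts.values(), default=0) + 1)]
--     for key in order:
--         buckets[counts[key]].append(key)
--     return [rep[key] for bucket in reversed(buckets) for key in bucket]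
-- ===== Notes on version B (the rewrite author's own statement) =====
-- stated objective: alternative
-- what changed: Replaces A's comparison sort by the composite key (-count,-latest_idx,key) with a pigeonhole/bucket ranking: a reverse pass yields counts and keys in latest-first order, each key is dropped into the bucket of its count, and buckets are concatenated from the highest count down, so no comparison sort (and no latest_idx map) is performed at all.
import Mathlib
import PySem

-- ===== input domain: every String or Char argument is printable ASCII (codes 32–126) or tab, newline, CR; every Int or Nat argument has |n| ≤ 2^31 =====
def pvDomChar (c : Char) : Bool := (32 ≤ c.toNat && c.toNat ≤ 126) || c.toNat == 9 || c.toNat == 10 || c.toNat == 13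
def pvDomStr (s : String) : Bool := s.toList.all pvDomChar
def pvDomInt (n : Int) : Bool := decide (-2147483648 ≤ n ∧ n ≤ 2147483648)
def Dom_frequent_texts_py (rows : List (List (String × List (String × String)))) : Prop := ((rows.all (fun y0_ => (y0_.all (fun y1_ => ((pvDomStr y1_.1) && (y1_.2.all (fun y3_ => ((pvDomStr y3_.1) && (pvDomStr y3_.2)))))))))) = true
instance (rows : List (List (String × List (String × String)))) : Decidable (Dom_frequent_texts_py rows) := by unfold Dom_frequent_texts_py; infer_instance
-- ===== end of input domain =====

-- B replaces A's comparison sort by the composite key (-count,-latest_idx,key) with a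
-- pigeonhole/bucket ranking (reverse pass for counts + latest-first key order, one bucket
-- per count, buckets emitted highest count first); "alternative": no speed claim.

-- ===== PORT A =====
-- row.get("data", {}).get("text", ""); the isinstance(text, str) test is always true
-- under the typed model (values are strings), so only the strip remains.
def pvEventText (row : List (String × List (String × String))) : String :=
  PySem.Str.strip ((PySem.Dict.mk ((PySem.Dict.mk row).getD "data" [])).getD "text" "")

def pvNormalize (text : String) : String :=
  PySem.Str.lower (PySem.Str.strip text)

-- latest_idx[k]/latest_text[k] in A are plain lookups that never miss (k comes from
-- counter.keys()); ported as getD with an unreachable default.  The 3-tuple sort key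
-- (-count, -latest_idx, k) is ported as a lexicographic (toLex) key.
def frequent_texts_py (rows : List (List (String × List (String × String)))) : List String :=
  if rows = [] then []
  else
    let st :=
      (PySem.List.enumerate rows).foldl
        (fun (st : PySem.Dict String Int × PySem.Dict String Int × PySem.Dict String String) p =>
          let text := pvEventText p.2
          let normalized := pvNormalize text
          if normalized = "" then st
          else (st.1.modify normalized 0 (· + 1), st.2.1.insert normalized p.1,
                st.2.2.insert normalized text))
        (PySem.Dict.empty, PySem.Dict.empty, PySem.Dict.empty)
    let ordered := PySem.List.sorted st.1.keys
        (fun k => toLex ((-(st.1.getD k 0) : Int), toLex ((-(st.2.1.getD k 0) : Int), k))) false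
    ordered.map (fun k => st.2.2.getD k "")

-- ===== PORT B =====
-- One reverse pass (counts, keys in latest-first order, representative texts); then
-- buckets[count].append(key) for each key in that order, and the buckets are emitted
-- from the highest count down ('[rep[key] for bucket in reversed(buckets) for key in bucket]').
def frequent_texts_py_alt (rows : List (List (String × List (String × String)))) : List String :=
  let st :=
    rows.reverse.foldl
      (fun (st : PySem.Dict String Int × List String × PySem.Dict String String) row =>
        let text := pvEventText row
        let key := pvNormalize text
        if key = "" then st
        else if st.1.contains key then (st.1.modify key 0 (· + 1), st.2)
        else (st.1.insert key 1, st.2.1 ++ [key], st.2.2.insert key text))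
      (PySem.Dict.empty, [], PySem.Dict.empty)
  let buckets0 : List (List String) :=
    (PySem.List.pyRange 0 (PySem.List.maxD st.1.values (fun v => v) 0 + 1) 1).map
      (fun _ => ([] : List String))
  let buckets :=
    st.2.1.foldl
      (fun bs k =>
        PySem.List.pySetD bs (st.1.getD k 0)
          (PySem.List.pyGetD bs (st.1.getD k 0) [] ++ [k]))
      buckets0
  buckets.reverse.flatMap (fun bucket => bucket.map (fun k => st.2.2.getD k ""))

-- ===== PRECONDITION & SPEC =====
def Spec_frequent_texts_py (rows : List (List (String × List (String × String)))) (out : List String) : Prop := out = frequent_texts_py_alt rows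
instance (rows : List (List (String × List (String × String)))) (out : List String) : Decidable (Spec_frequent_texts_py rows out) := by unfold Spec_frequent_texts_py; infer_instance

-- ===== CLAIM (what is proved, stated in full; the proofs are below) =====
def Claim_equal_frequent_texts_py : Prop := ∀ (rows : List (List (String × List (String × String)))), Dom_frequent_texts_py rows → Spec_frequent_texts_py rows (frequent_texts_py rows)

-- ===== LEMMAS AND PROOFS =====

-- Abbreviations for the proof: key of a row, the filtered enumerate list, the filtered
-- rows, the key list, count / latest index / latest text of a key, keys in latest-first
-- order, the maximal count, the bucket list, the final key ordering.
def pvKey (row : List (String × List (String × String))) : String :=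
  pvNormalize (pvEventText row)

def pvL (rows : List (List (String × List (String × String)))) : List (Int × List (String × List (String × String))) :=
  (PySem.List.enumerate rows).filter (fun p => decide ¬(pvKey p.2 = ""))

def pvR (rows : List (List (String × List (String × String)))) : List (List (String × List (String × String))) :=
  rows.filter (fun r => decide ¬(pvKey r = ""))

def pvK (rows : List (List (String × List (String × String)))) : List String :=
  (pvR rows).map pvKey

def pvC (rows : List (List (String × List (String × String)))) (k : String) : Int :=
  (List.count k (pvK rows) : Int)

def pvJ (rows : List (List (String × List (String × String)))) (k : String) : Int :=
  match (pvL rows).reverse.find? (fun p => pvKey p.2 == k) with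
  | some p => p.1
  | none => 0

def pvT (rows : List (List (String × List (String × String)))) (k : String) : String :=
  match (pvR rows).reverse.find? (fun r => pvKey r == k) with
  | some r => pvEventText r
  | none => ""

def pvO (rows : List (List (String × List (String × String)))) : List String :=
  PySem.Set.ofList ((pvK rows).reverse)

def pvM (rows : List (List (String × List (String × String)))) : Int :=
  PySem.List.maxD ((pvO rows).map (fun k => pvC rows k)) (fun v => v) 0

def pvN (rows : List (List (String × List (String × String)))) : Nat :=
  (pvM rows + 1).toNat

def pvIs (rows : List (List (String × List (String × String)))) : List Int :=
  (List.range (pvN rows)).map (fun j => Int.ofNat j)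

def pvBuckets (rows : List (List (String × List (String × String)))) : List (List String) :=
  (pvIs rows).map (fun i => (pvO rows).filter (fun k => decide (pvC rows k = i)))

def pvYs (rows : List (List (String × List (String × String)))) : List String :=
  ((pvBuckets rows).reverse).flatten

theorem pv_enum_map_snd {α : Type} (xs : List α) (i : Int) :
    (PySem.List.enumerate xs i).map (·.2) = xs := by
  induction xs generalizing i with
  | nil => simp [PySem.List.enumerate]
  | cons x t ih => simp [PySem.List.enumerate, ih]

theorem pv_enum_ge {α : Type} (xs : List α) (i : Int) :
    ∀ q ∈ PySem.List.enumerate xs i, i ≤ q.1 := by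
  induction xs generalizing i with
  | nil => simp [PySem.List.enumerate]
  | cons x t ih =>
    intro q hq
    simp only [PySem.List.enumerate, List.mem_cons] at hq
    rcases hq with h | h
    · simp [h]
    · have := ih (i + 1) q h; omega

theorem pv_enum_pairwise {α : Type} (xs : List α) (i : Int) :
    (PySem.List.enumerate xs i).Pairwise (fun p q => p.1 < q.1) := by
  induction xs generalizing i with
  | nil => simp [PySem.List.enumerate]
  | cons x t ih =>
    simp only [PySem.List.enumerate, List.pairwise_cons]
    refine ⟨fun q hq => ?_, ih (i + 1)⟩
    have := pv_enum_ge t (i + 1) q hq; omega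

theorem pv_map_filter {α β : Type} (f : α → β) (p : β → Bool) (l : List α) :
    (l.filter (fun x => p (f x))).map f = (l.map f).filter p := by
  induction l with
  | nil => rfl
  | cons x t ih =>
    by_cases h : p (f x)
    · simp [List.filter_cons, h, ih]
    · simp [List.filter_cons, h, ih]

theorem pv_getD_foldl_insert_lastwins {α κ ν : Type} [BEq κ] [LawfulBEq κ]
    (kf : α → κ) (vf : α → ν) :
    ∀ (l : List α) (d : PySem.Dict κ ν) (k : κ) (dflt : ν),
      (l.foldl (fun d a => d.insert (kf a) (vf a)) d).getD k dflt =
        match l.reverse.find? (fun a => kf a == k) with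
        | some a => vf a
        | none => d.getD k dflt := by
  intro l
  induction l with
  | nil => intro d k dflt; rfl
  | cons a t ih =>
    intro d k dflt
    simp only [List.foldl_cons, List.reverse_cons, List.find?_append]
    rw [ih]
    cases hf : t.reverse.find? (fun a => kf a == k) with
    | some b => simp [hf]
    | none =>
      simp only [Option.or]
      cases hk : (kf a == k) with
      | true =>
        have : k = kf a := (eq_of_beq hk).symm
        subst this
        simp [List.find?, hk, PySem.Dict.getD_insert_self]
      | false =>
        simp only [List.find?, hk]
        rw [PySem.Dict.getD_insert_of_ne]
        intro h; subst h; simp at hk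

theorem pv_find?_max {α : Type} (f : α → Int) :
    ∀ (r : List α) (p : α → Bool) (x : α), r.Pairwise (fun a b => f b < f a) →
      r.find? p = some x → ∀ y ∈ r, p y = true → f y ≤ f x := by
  intro r
  induction r with
  | nil => intro p x _ h; simp at h
  | cons a t ih =>
    intro p x hpw hfind y hy hpy
    rw [List.pairwise_cons] at hpw
    cases ha : p a with
    | true =>
      simp only [List.find?_cons, ha, Option.some.injEq] at hfind
      rcases List.mem_cons.mp hy with rfl | hy
      · rw [hfind]
      · rw [← hfind]; exact le_of_lt (hpw.1 y hy)
    | false =>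
      simp only [List.find?_cons, ha] at hfind
      rcases List.mem_cons.mp hy with rfl | hy
      · rw [hpy] at ha; cases ha
      · exact ih p x hpw.2 hfind y hy hpy

theorem pv_getD_foldl_insert_firstwins {α κ ν : Type} [BEq κ] [LawfulBEq κ]
    (kf : α → κ) (vf : α → ν) :
    ∀ (l : List α) (d : PySem.Dict κ ν) (k : κ) (dflt : ν),
      (l.foldl (fun d a => if d.contains (kf a) then d else d.insert (kf a) (vf a)) d).getD k dflt =
        if d.contains k then d.getD k dflt
        else match l.find? (fun a => kf a == k) with
             | some a => vf a
             | none => dflt := by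
  intro l
  induction l with
  | nil =>
    intro d k dflt
    simp only [List.foldl_nil, List.find?_nil]
    by_cases h : d.contains k = true
    · rw [if_pos h]
    · rw [if_neg h]
      rw [Bool.not_eq_true] at h
      exact PySem.Dict.getD_of_not_contains d dflt h
  | cons a t ih =>
    intro d k dflt
    simp only [List.foldl_cons]
    cases hc : d.contains (kf a) with
    | true =>
      rw [if_pos rfl, ih]
      cases hk : (kf a == k) with
      | true =>
        have : k = kf a := (eq_of_beq hk).symm
        subst this
        simp [List.find?, hk, hc]
      | false => simp [List.find?, hk]
    | false =>
      rw [if_neg (by simp), ih]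
      cases hk : (kf a == k) with
      | true =>
        have : k = kf a := (eq_of_beq hk).symm
        subst this
        rw [PySem.Dict.contains_insert, BEq.refl]
        simp only [Bool.true_or, if_pos]
        simp [List.find?, hk, hc, PySem.Dict.getD_insert_self]
      | false =>
        have hne : k ≠ kf a := by intro h; subst h; simp at hk
        rw [PySem.Dict.contains_insert]
        have : (k == kf a) = false := by simpa using hne
        rw [this, Bool.false_or]
        by_cases hck : d.contains k = true
        · rw [if_pos hck, if_pos hck, PySem.Dict.getD_insert_of_ne _ _ _ hne]
        · rw [if_neg hck, if_neg hck]
          simp [List.find?, hk]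

theorem pv_dedup_rev_pairwise_aux {α : Type} (g : α → String) (J : String → Int) :
    ∀ (s : List (Int × α)) (acc : List String),
      acc.Pairwise (fun a b => J b < J a) →
      s.Pairwise (fun p q => q.1 < p.1) →
      (∀ k ∈ acc, ∀ q ∈ s, q.1 < J k) →
      (∀ k, k ∉ acc → ∀ q ∈ s, g q.2 = k → q.1 ≤ J k) →
      (∀ k, k ∉ acc → ∀ q ∈ s, g q.2 = k → ∃ q' ∈ s, g q'.2 = k ∧ J k = q'.1) →
      (s.foldl (fun a q => PySem.Set.add a (g q.2)) acc).Pairwise (fun a b => J b < J a) := by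
  intro s
  induction s with
  | nil => intro acc h _ _ _ _; exact h
  | cons q t ih =>
    intro acc hacc hdec h3 h4 h5
    rw [List.pairwise_cons] at hdec
    simp only [List.foldl_cons]
    by_cases hmem : g q.2 ∈ acc
    · rw [show PySem.Set.add acc (g q.2) = acc by simp [PySem.Set.add, PySem.Set.contains, hmem]]
      apply ih acc hacc hdec.2
      · intro k hk p hp; exact h3 k hk p (List.mem_cons_of_mem _ hp)
      · intro k hk p hp hg; exact h4 k hk p (List.mem_cons_of_mem _ hp) hg
      · intro k hk p hp hg
        rcases h5 k hk p (List.mem_cons_of_mem _ hp) hg with ⟨q', hq', hgq', hJ⟩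
        rcases List.mem_cons.mp hq' with rfl | hq'
        · exact absurd (hgq' ▸ hmem) hk
        · exact ⟨q', hq', hgq', hJ⟩
    · have hJq : J (g q.2) = q.1 := by
        have h1 : q.1 ≤ J (g q.2) := h4 _ hmem q List.mem_cons_self rfl
        rcases h5 _ hmem q List.mem_cons_self rfl with ⟨q', hq', _, hJ⟩
        rcases List.mem_cons.mp hq' with rfl | hq'
        · exact hJ.symm ▸ rfl
        · exfalso; have := hdec.1 q' hq'; omega
      rw [show PySem.Set.add acc (g q.2) = acc ++ [g q.2] by
        simp [PySem.Set.add, PySem.Set.contains, hmem]]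
      apply ih
      · rw [List.pairwise_append]
        refine ⟨hacc, by simp, ?_⟩
        intro a ha b hb
        rcases List.mem_singleton.mp hb with rfl
        rw [hJq]
        exact h3 a ha q List.mem_cons_self
      · exact hdec.2
      · intro k hk p hp
        rcases List.mem_append.mp hk with hk | hk
        · exact h3 k hk p (List.mem_cons_of_mem _ hp)
        · rcases List.mem_singleton.mp hk with rfl
          rw [hJq]; exact hdec.1 p hp
      · intro k hk p hp hg
        have hk' : k ∉ acc := fun h => hk (List.mem_append.mpr (Or.inl h))
        exact h4 k hk' p (List.mem_cons_of_mem _ hp) hg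
      · intro k hk p hp hg
        have hk' : k ∉ acc := fun h => hk (List.mem_append.mpr (Or.inl h))
        have hkq : k ≠ g q.2 := fun h => hk (List.mem_append.mpr (Or.inr (by simp [h])))
        rcases h5 k hk' p (List.mem_cons_of_mem _ hp) hg with ⟨q', hq', hgq', hJ⟩
        rcases List.mem_cons.mp hq' with rfl | hq'
        · exact absurd hgq'.symm hkq
        · exact ⟨q', hq', hgq', hJ⟩

theorem pv_bfold {α : Type} (kf tf : α → String) :
    ∀ (l : List α) (c : PySem.Dict String Int) (o : List String) (rp : PySem.Dict String String),
      o = c.keys → (∀ k, c.contains k = rp.contains k) →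
      (l.foldl
        (fun (st : PySem.Dict String Int × List String × PySem.Dict String String) row =>
          if st.1.contains (kf row) then (st.1.modify (kf row) 0 (· + 1), st.2)
          else (st.1.insert (kf row) 1, st.2.1 ++ [kf row], st.2.2.insert (kf row) (tf row)))
        (c, o, rp)) =
      (l.foldl (fun d row => d.modify (kf row) 0 (· + 1)) c,
       (l.foldl (fun d row => d.modify (kf row) 0 (· + 1)) c).keys,
       (l.foldl (fun d row => if d.contains (kf row) then d else d.insert (kf row) (tf row)) rp)) := by
  intro l
  induction l with
  | nil =>
    intro c o rp ho _
    simp [ho]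
  | cons row t ih =>
    intro c o rp ho hcr
    simp only [List.foldl_cons]
    cases hc : c.contains (kf row) with
    | true =>
      rw [if_pos rfl]
      have hkeys : (c.modify (kf row) 0 (· + 1)).keys = c.keys := by
        rw [PySem.Dict.keys_modify, PySem.Dict.keys_insert_of_contains _ _ hc]
      have hcr' : ∀ k, (c.modify (kf row) 0 (· + 1)).contains k = rp.contains k := by
        intro k
        rw [PySem.Dict.contains_modify]
        cases hk : (k == kf row) with
        | true =>
          simp only [hk, Bool.true_or]
          rw [← hcr k, eq_of_beq hk]
          exact hc.symm
        | false => simp [hcr k]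
      rw [show (if rp.contains (kf row) = true then rp else rp.insert (kf row) (tf row)) = rp by
        rw [← hcr (kf row), hc]; simp]
      exact ih (c.modify (kf row) 0 (· + 1)) o rp (by rw [ho, hkeys]) hcr'
    | false =>
      rw [if_neg (by simp)]
      have hmod : c.insert (kf row) 1 = c.modify (kf row) 0 (· + 1) := by
        unfold PySem.Dict.modify
        rw [PySem.Dict.getD_of_not_contains _ _ hc]
        norm_num
      have hkeys : (c.modify (kf row) 0 (· + 1)).keys = c.keys ++ [kf row] := by
        rw [PySem.Dict.keys_modify, PySem.Dict.keys_insert_of_not_contains _ _ hc]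
      have hcr' : ∀ k, (c.modify (kf row) 0 (· + 1)).contains k
          = (rp.insert (kf row) (tf row)).contains k := by
        intro k
        rw [PySem.Dict.contains_modify, PySem.Dict.contains_insert, hcr k]
      rw [show (if rp.contains (kf row) = true then rp else rp.insert (kf row) (tf row))
            = rp.insert (kf row) (tf row) by rw [← hcr (kf row), hc]; simp]
      rw [hmod]
      exact ih (c.modify (kf row) 0 (· + 1)) (o ++ [kf row]) (rp.insert (kf row) (tf row))
        (by rw [ho, hkeys]) hcr'

theorem pvL_map_snd (rows : List (List (String × List (String × String)))) :
    (pvL rows).map (·.2) = pvR rows := by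
  unfold pvL pvR
  rw [pv_map_filter (fun (x : Int × List (String × List (String × String))) => x.2)
        (fun r => decide ¬(pvKey r = "")) (PySem.List.enumerate rows), pv_enum_map_snd]

theorem pvL_pairwise (rows : List (List (String × List (String × String)))) :
    (pvL rows).Pairwise (fun p q => p.1 < q.1) :=
  List.Pairwise.sublist List.filter_sublist (pv_enum_pairwise rows 0)

theorem pvK_eq (rows : List (List (String × List (String × String)))) :
    pvK rows = (pvL rows).map (fun p => pvKey p.2) := by
  rw [pvK, ← pvL_map_snd, List.map_map]
  rfl

theorem pv_afold {α : Type} (kf : α → String) (vf : α → Int) (tf : α → String) :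
    ∀ (l : List α) (c i : PySem.Dict String Int) (t : PySem.Dict String String),
      (l.foldl
        (fun (st : PySem.Dict String Int × PySem.Dict String Int × PySem.Dict String String) a =>
          (st.1.modify (kf a) 0 (· + 1), st.2.1.insert (kf a) (vf a), st.2.2.insert (kf a) (tf a)))
        (c, i, t)) =
      (l.foldl (fun d a => d.modify (kf a) 0 (· + 1)) c,
       l.foldl (fun d a => d.insert (kf a) (vf a)) i,
       l.foldl (fun d a => d.insert (kf a) (tf a)) t) := by
  intro l
  induction l with
  | nil => intro c i t; rfl
  | cons a l ih =>
    intro c i t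
    simp only [List.foldl_cons]
    exact ih _ _ _

theorem pvA_counter (rows : List (List (String × List (String × String)))) :
    (pvL rows).foldl (fun d p => d.modify (pvKey p.2) 0 (· + 1)) PySem.Dict.empty
      = PySem.Dict.counter (pvK rows) := by
  rw [PySem.Dict.counter_eq_foldl, pvK_eq, List.foldl_map]

theorem pvA_idx (rows : List (List (String × List (String × String)))) (k : String) :
    ((pvL rows).foldl (fun d p => d.insert (pvKey p.2) p.1) PySem.Dict.empty).getD k 0
      = pvJ rows k := by
  rw [pv_getD_foldl_insert_lastwins]
  unfold pvJ
  cases hf : (pvL rows).reverse.find? (fun p => pvKey p.2 == k) <;> simp [hf, PySem.Dict.getD_empty]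

theorem pvA_text (rows : List (List (String × List (String × String)))) (k : String) :
    ((pvL rows).foldl (fun d p => d.insert (pvKey p.2) (pvEventText p.2)) PySem.Dict.empty).getD k ""
      = pvT rows k := by
  rw [pv_getD_foldl_insert_lastwins]
  unfold pvT
  have hRL : (pvR rows).reverse = ((pvL rows).reverse).map (·.2) := by
    rw [← pvL_map_snd, List.map_reverse]
  rw [hRL, List.find?_map]
  simp only [Function.comp_def]
  cases hf : (pvL rows).reverse.find? (fun p => pvKey p.2 == k) with
  | some p => simp [hf]
  | none => simp [hf, PySem.Dict.getD_empty]

theorem pvB_text (rows : List (List (String × List (String × String)))) (k : String) :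
    ((pvR rows).reverse.foldl
        (fun d row => if d.contains (pvKey row) then d else d.insert (pvKey row) (pvEventText row))
        PySem.Dict.empty).getD k ""
      = pvT rows k := by
  rw [pv_getD_foldl_insert_firstwins]
  rw [if_neg (by simp [PySem.Dict.contains_empty])]
  unfold pvT
  cases hf : (pvR rows).reverse.find? (fun r => pvKey r == k) <;> simp [hf]

theorem pv_dedup_wrapper (rows : List (List (String × List (String × String)))) :
    (pvO rows).Pairwise (fun a b => pvJ rows b < pvJ rows a) := by
  unfold pvO
  have hK : (pvK rows).reverse = ((pvL rows).reverse).map (fun p => pvKey p.2) := by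
    rw [pvK_eq, List.map_reverse]
  rw [hK]
  rw [show PySem.Set.ofList (((pvL rows).reverse).map (fun p => pvKey p.2))
        = ((pvL rows).reverse).foldl (fun a q => PySem.Set.add a (pvKey q.2)) [] from by
      unfold PySem.Set.ofList
      rw [List.foldl_map]
      rfl]
  have hdec : ((pvL rows).reverse).Pairwise (fun p q => q.1 < p.1) :=
    List.pairwise_reverse.mpr (pvL_pairwise rows)
  apply pv_dedup_rev_pairwise_aux (fun row => pvKey row) (pvJ rows) ((pvL rows).reverse) []
    (by simp) hdec (by simp)
  · intro k _ q hq hg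
    have hsome : ((pvL rows).reverse.find? (fun p => pvKey p.2 == k)).isSome := by
      rw [List.find?_isSome]
      exact ⟨q, hq, by simp [hg]⟩
    rcases Option.isSome_iff_exists.mp hsome with ⟨x, hx⟩
    have hJ : pvJ rows k = x.1 := by unfold pvJ; rw [hx]
    rw [hJ]
    exact pv_find?_max (·.1) _ _ x hdec hx q hq (by simp [hg])
  · intro k _ q hq hg
    have hsome : ((pvL rows).reverse.find? (fun p => pvKey p.2 == k)).isSome := by
      rw [List.find?_isSome]
      exact ⟨q, hq, by simp [hg]⟩
    rcases Option.isSome_iff_exists.mp hsome with ⟨x, hx⟩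
    refine ⟨x, List.mem_of_find?_eq_some hx, ?_, by unfold pvJ; rw [hx]⟩
    have := List.find?_some hx
    simpa using this

theorem pvA_eq (rows : List (List (String × List (String × String)))) (h : ¬rows = []) :
    frequent_texts_py rows =
      (PySem.List.sorted (PySem.Set.ofList (pvK rows))
        (fun k => toLex ((-(pvC rows k) : Int),
          toLex ((-(pvJ rows k) : Int), k))) false).map (fun k => pvT rows k) := by
  unfold frequent_texts_py
  rw [if_neg h]
  have hstep : (fun (st : PySem.Dict String Int × PySem.Dict String Int × PySem.Dict String String)
        (p : Int × List (String × List (String × String))) =>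
        let text := pvEventText p.2
        let normalized := pvNormalize text
        if normalized = "" then st
        else (st.1.modify normalized 0 (· + 1), st.2.1.insert normalized p.1,
              st.2.2.insert normalized text))
      = (fun st p => if ¬(pvKey p.2 = "") then
          (st.1.modify (pvKey p.2) 0 (· + 1), st.2.1.insert (pvKey p.2) p.1,
           st.2.2.insert (pvKey p.2) (pvEventText p.2)) else st) := by
    funext st p
    show (if pvKey p.2 = "" then st else _) = _
    by_cases hk : pvKey p.2 = "" <;> simp [pvKey, hk]
  rw [hstep]
  rw [PySem.List.foldl_ite_eq_foldl_filter
        (fun (p : Int × List (String × List (String × String))) => ¬(pvKey p.2 = ""))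
        (fun (st : PySem.Dict String Int × PySem.Dict String Int × PySem.Dict String String) p =>
          (st.1.modify (pvKey p.2) 0 (· + 1), st.2.1.insert (pvKey p.2) p.1,
           st.2.2.insert (pvKey p.2) (pvEventText p.2)))]
  rw [show ((PySem.List.enumerate rows).filter (fun p => decide ¬(pvKey p.2 = ""))) = pvL rows from rfl]
  rw [pv_afold]
  rw [pvA_counter]
  simp only [PySem.Dict.keys_counter, PySem.Dict.getD_counter, pvA_idx, pvA_text]
  rfl

-- B side: the first fold, then the bucket fold, characterized index by index.
theorem pv_bucket_foldl (c : String → Int) :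
    ∀ (l : List String) (bs : List (List String)),
      (∀ k ∈ l, 0 ≤ c k ∧ c k < (bs.length : Int)) → ∀ (j : Nat),
      (l.foldl (fun bs k =>
          PySem.List.pySetD bs (c k) (PySem.List.pyGetD bs (c k) [] ++ [k])) bs)[j]?
        = (bs[j]?).map (fun b => b ++ l.filter (fun k => decide (c k = (j : Int)))) := by
  intro l
  induction l with
  | nil =>
    intro bs _ j
    simp
  | cons k t ih =>
    intro bs hb j
    have hk := hb k List.mem_cons_self
    have hn : (c k).toNat < bs.length := by omega
    have hset : PySem.List.pySetD bs (c k) (PySem.List.pyGetD bs (c k) [] ++ [k])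
        = bs.set (c k).toNat (bs[(c k).toNat] ++ [k]) := by
      rw [PySem.List.pySetD_of_nonneg _ _ hk.1,
          PySem.List.pyGetD_eq_getElem _ _ hk.1 hk.2]
    simp only [List.foldl_cons, hset]
    rw [ih]
    · rw [List.getElem?_set]
      by_cases hj : (c k).toNat = j
      · subst hj
        have hceq : decide (c k = ((c k).toNat : Int)) = true := by
          simp; omega
        simp [hn, List.filter_cons, hceq, List.getElem?_eq_getElem hn]
        exact hk.1
      · have hcne : decide (c k = (j : Int)) = false := by
          simp; omega
        simp [hj, List.filter_cons, hcne]
    · intro x hx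
      have := hb x (List.mem_cons_of_mem _ hx)
      simpa using this

theorem pv_flatten_filter_perm {ι : Type} [DecidableEq ι] (c : String → ι) :
    ∀ (is : List ι), is.Nodup → ∀ (l : List String), (∀ k ∈ l, c k ∈ is) →
      ((is.map (fun i => l.filter (fun k => decide (c k = i)))).flatten).Perm l := by
  intro is
  induction is with
  | nil =>
    intro _ l hl
    have : l = [] := List.eq_nil_iff_forall_not_mem.mpr (fun a ha => by simpa using hl a ha)
    simp [this]
  | cons i t ih =>
    intro hnd l hl
    rw [List.nodup_cons] at hnd
    simp only [List.map_cons, List.flatten_cons]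
    have hsub : ∀ j ∈ t, l.filter (fun k => decide (c k = j))
        = (l.filter (fun k => !decide (c k = i))).filter (fun k => decide (c k = j)) := by
      intro j hj
      rw [List.filter_filter]
      apply List.filter_congr
      intro x _
      by_cases hx : c x = j
      · have hji : ¬ j = i := by
          intro h
          exact hnd.1 (by rwa [h] at hj)
        simp [hx, hji]
      · simp [hx]
    have hmap : t.map (fun j => l.filter (fun k => decide (c k = j)))
        = t.map (fun j => (l.filter (fun k => !decide (c k = i))).filter
            (fun k => decide (c k = j))) := by
      apply List.map_congr_left
      intro j hj
      exact hsub j hj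
    rw [hmap]
    have hperm := ih hnd.2 (l.filter (fun k => !decide (c k = i)))
      (by
        intro x hx
        rw [List.mem_filter] at hx
        have := hl x hx.1
        rcases List.mem_cons.mp this with h | h
        · exfalso; have := hx.2; simp [h] at this
        · exact h)
    exact (List.Perm.append_left _ hperm).trans
      (List.filter_append_perm (fun k => decide (c k = i)) l)

theorem pv_values_counter (rows : List (List (String × List (String × String)))) :
    (PySem.Dict.counter ((pvK rows).reverse)).values = (pvO rows).map (fun k => pvC rows k) := by
  have hnd : (PySem.Dict.counter ((pvK rows).reverse)).keys.Nodup := by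
    rw [PySem.Dict.keys_counter]
    exact PySem.Set.nodup_ofList _
  rw [PySem.Dict.values_eq_map_keys _ hnd 0, PySem.Dict.keys_counter]
  apply List.map_congr_left
  intro k _
  rw [PySem.Dict.getD_counter]
  unfold pvC
  rw [List.count_reverse]

theorem pv_count_le_max (rows : List (List (String × List (String × String))))
    (k : String) (hk : k ∈ pvO rows) : pvC rows k ≤ pvM rows := by
  unfold pvM
  have hmem : pvC rows k ∈ (pvO rows).map (fun k => pvC rows k) :=
    List.mem_map_of_mem hk
  have hne : (pvO rows).map (fun k => pvC rows k) ≠ [] := by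
    intro h; rw [h] at hmem; cases hmem
  rw [PySem.List.maxD.eq_1]
  cases hmax : PySem.List.max? ((pvO rows).map (fun k => pvC rows k)) (fun v => v) with
  | none =>
    exact absurd ((PySem.List.max?_eq_none_iff _ _).mp hmax) hne
  | some m =>
    have := PySem.List.max?_isMax hmax (pvC rows k) hmem
    simpa using this

theorem pv_count_pos (rows : List (List (String × List (String × String))))
    (k : String) (hk : k ∈ pvO rows) : 1 ≤ pvC rows k := by
  unfold pvO at hk
  rw [PySem.Set.mem_ofList] at hk
  rw [List.mem_reverse] at hk
  unfold pvC
  have := List.count_pos_iff.mpr hk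
  omega

theorem pv_getD_counter_rev (rows : List (List (String × List (String × String))))
    (k : String) :
    (PySem.Dict.counter ((pvK rows).reverse)).getD k 0 = pvC rows k := by
  rw [PySem.Dict.getD_counter]
  unfold pvC
  rw [List.count_reverse]

theorem pv_M_nonneg (rows : List (List (String × List (String × String)))) :
    0 ≤ pvM rows := by
  by_cases h : pvO rows = []
  · unfold pvM
    rw [h]
    simp [PySem.List.maxD_nil]
  · rcases List.exists_mem_of_ne_nil _ h with ⟨k, hk⟩
    have h1 := pv_count_pos rows k hk
    have h2 := pv_count_le_max rows k hk
    omega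

theorem pv_N_cast (rows : List (List (String × List (String × String)))) :
    ((pvN rows : Nat) : Int) = pvM rows + 1 := by
  unfold pvN
  have := pv_M_nonneg rows
  omega

theorem pv_bounds (rows : List (List (String × List (String × String)))) :
    ∀ k ∈ pvO rows, 0 ≤ pvC rows k ∧ pvC rows k < ((pvN rows : Nat) : Int) := by
  intro k hk
  rw [pv_N_cast]
  have h1 := pv_count_pos rows k hk
  have h2 := pv_count_le_max rows k hk
  omega

theorem pv_buckets_eq (rows : List (List (String × List (String × String)))) :
    (pvO rows).foldl
        (fun bs k => PySem.List.pySetD bs (pvC rows k)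
          (PySem.List.pyGetD bs (pvC rows k) [] ++ [k]))
        ((PySem.List.pyRange 0 (pvM rows + 1) 1).map (fun _ => ([] : List String)))
      = pvBuckets rows := by
  apply List.ext_getElem?
  intro j
  have hlen : ((PySem.List.pyRange 0 (pvM rows + 1) 1).map
      (fun _ => ([] : List String))).length = pvN rows := by
    rw [List.length_map, PySem.List.length_pyRange_one]
    unfold pvN
    norm_num
  rw [pv_bucket_foldl (pvC rows) (pvO rows) _ (by rw [hlen]; exact pv_bounds rows)]
  unfold pvBuckets pvIs
  rw [List.map_map]
  by_cases hj : j < pvN rows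
  · have h0 : ((PySem.List.pyRange 0 (pvM rows + 1) 1).map
        (fun _ => ([] : List String)))[j]? = some [] := by
      apply List.getElem?_eq_getElem (by rw [hlen]; exact hj) |>.trans
      simp
    rw [h0, List.getElem?_map, List.getElem?_range hj]
    simp
  · have h0 : ((PySem.List.pyRange 0 (pvM rows + 1) 1).map
        (fun _ => ([] : List String)))[j]? = none := by
      rw [List.getElem?_eq_none_iff, hlen]
      omega
    rw [h0, List.getElem?_map,
        List.getElem?_eq_none_iff.mpr (by rw [List.length_range]; omega)]
    rfl

theorem pvB_eq (rows : List (List (String × List (String × String)))) :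
    frequent_texts_py_alt rows = (pvYs rows).map (fun k => pvT rows k) := by
  unfold frequent_texts_py_alt
  have hstep : (fun (st : PySem.Dict String Int × List String × PySem.Dict String String)
        (row : List (String × List (String × String))) =>
        let text := pvEventText row
        let key := pvNormalize text
        if key = "" then st
        else if st.1.contains key then (st.1.modify key 0 (· + 1), st.2)
        else (st.1.insert key 1, st.2.1 ++ [key], st.2.2.insert key text))
      = (fun st row => if ¬(pvKey row = "") then
          (if st.1.contains (pvKey row) then (st.1.modify (pvKey row) 0 (· + 1), st.2)
           else (st.1.insert (pvKey row) 1, st.2.1 ++ [pvKey row],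
                 st.2.2.insert (pvKey row) (pvEventText row))) else st) := by
    funext st row
    show (if pvKey row = "" then st else _) = _
    by_cases hk : pvKey row = "" <;> simp [pvKey, hk]
  rw [hstep]
  rw [PySem.List.foldl_ite_eq_foldl_filter
        (fun (row : List (String × List (String × String))) => ¬(pvKey row = ""))
        (fun (st : PySem.Dict String Int × List String × PySem.Dict String String) row =>
          (if st.1.contains (pvKey row) then (st.1.modify (pvKey row) 0 (· + 1), st.2)
           else (st.1.insert (pvKey row) 1, st.2.1 ++ [pvKey row],
                 st.2.2.insert (pvKey row) (pvEventText row))))]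
  rw [show (rows.reverse.filter (fun row => decide ¬(pvKey row = ""))) = (pvR rows).reverse from by
    rw [List.filter_reverse]; rfl]
  rw [pv_bfold pvKey pvEventText ((pvR rows).reverse) PySem.Dict.empty [] PySem.Dict.empty rfl
        (fun k => rfl)]
  have hc' : (pvR rows).reverse.foldl (fun d row => d.modify (pvKey row) 0 (· + 1)) PySem.Dict.empty
      = PySem.Dict.counter ((pvK rows).reverse) := by
    rw [PySem.Dict.counter_eq_foldl,
        show (pvK rows).reverse = ((pvR rows).reverse).map pvKey from by
          rw [pvK, List.map_reverse],
        List.foldl_map]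
  rw [hc']
  simp only [PySem.Dict.keys_counter, pv_getD_counter_rev, pv_values_counter]
  rw [show PySem.Set.ofList ((pvK rows).reverse) = pvO rows from rfl]
  rw [show PySem.List.maxD ((pvO rows).map (fun k => pvC rows k)) (fun v => v) 0 = pvM rows from rfl]
  rw [pv_buckets_eq rows]
  simp only [pvB_text]
  rw [List.flatMap_def, ← List.map_flatten]
  rfl

theorem pv_ys_as_filters (rows : List (List (String × List (String × String)))) :
    pvYs rows = (((pvIs rows).reverse).map
      (fun i => (pvO rows).filter (fun k => decide (pvC rows k = i)))).flatten := by
  unfold pvYs pvBuckets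
  rw [← List.map_reverse]

theorem pv_perm_ys (rows : List (List (String × List (String × String)))) :
    (pvYs rows).Perm (PySem.Set.ofList (pvK rows)) := by
  have h1 : (pvYs rows).Perm (pvO rows) := by
    rw [pv_ys_as_filters]
    apply pv_flatten_filter_perm (pvC rows)
    · rw [List.nodup_reverse]
      unfold pvIs
      exact List.Nodup.map (fun a b hab => Int.ofNat.inj hab) List.nodup_range
    · intro k hk
      rcases pv_bounds rows k hk with ⟨h0, hlt⟩
      rw [List.mem_reverse]
      unfold pvIs
      rw [List.mem_map]
      refine ⟨(pvC rows k).toNat, ?_, Int.toNat_of_nonneg h0⟩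
      rw [List.mem_range]
      omega
  refine h1.trans ?_
  unfold pvO
  rw [List.perm_ext_iff_of_nodup (PySem.Set.nodup_ofList _) (PySem.Set.nodup_ofList _)]
  intro a
  simp [PySem.Set.mem_ofList]

theorem pv_pairwise_ys (rows : List (List (String × List (String × String)))) :
    (pvYs rows).Pairwise (fun a b =>
      (toLex ((-(pvC rows a) : Int), toLex ((-(pvJ rows a) : Int), a)))
        < (toLex ((-(pvC rows b) : Int), toLex ((-(pvJ rows b) : Int), b)))) := by
  rw [pv_ys_as_filters]
  rw [List.pairwise_flatten]
  constructor
  · intro b hb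
    rw [List.mem_map] at hb
    rcases hb with ⟨i, _, rfl⟩
    have hfil : ((pvO rows).filter
        (fun k => decide (pvC rows k = i))).Pairwise
        (fun a b => pvJ rows b < pvJ rows a) :=
      List.Pairwise.sublist List.filter_sublist (pv_dedup_wrapper rows)
    apply List.Pairwise.imp_of_mem _ hfil
    intro a b ha hb hJ
    rw [List.mem_filter] at ha hb
    have hca : pvC rows a = i := by simpa using ha.2
    have hcb : pvC rows b = i := by simpa using hb.2
    rw [Prod.Lex.lt_iff]
    simp only [ofLex_toLex]
    refine Or.inr ⟨by omega, ?_⟩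
    rw [Prod.Lex.lt_iff]
    simp only [ofLex_toLex]
    exact Or.inl (by omega)
  · rw [List.pairwise_map]
    have hrev : ((pvIs rows).reverse).Pairwise (fun a b => b < a) := by
      rw [List.pairwise_reverse]
      unfold pvIs
      rw [List.pairwise_map]
      exact List.pairwise_lt_range.imp (fun h => Int.ofNat_lt.mpr h)
    apply List.Pairwise.imp_of_mem _ hrev
    intro i1 i2 _ _ hlt x hx y hy
    rw [List.mem_filter] at hx hy
    have hcx : pvC rows x = i1 := by simpa using hx.2
    have hcy : pvC rows y = i2 := by simpa using hy.2
    rw [Prod.Lex.lt_iff]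
    simp only [ofLex_toLex]
    exact Or.inl (by omega)

-- ===== VERDICT (by name: the statement is the Claim_ definition above) =====
theorem frequent_texts_py_spec : Claim_equal_frequent_texts_py := by
  unfold Claim_equal_frequent_texts_py
  intro rows _
  unfold Spec_frequent_texts_py
  by_cases h : rows = []
  · subst h; rfl
  · rw [pvA_eq rows h, pvB_eq rows,
        PySem.List.sorted_eq_of_perm_of_pairwise_lt _ (pvYs rows) _
          (pv_perm_ys rows) (pv_pairwise_ys rows)]
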